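-- pv_equiv track=rewrite | github.com/microsoft/DeepGNN | src/python/deepgnn/graph_engine/graph_ops.py | get_skipgrams_size
-- ===== SOURCE A (Python) =====
-- def get_skipgrams_size(path_len: int, left_win_size: int, right_win_size: int) -> int:
--     """Compute skipgrams size."""
--     pair_count = 0
--     assert path_len > 0
--     for i in range(path_len):
--         pair_count += (i - max(0, i - left_win_size)) + (
--             min(path_len - 1, i + right_win_size) - i
--         )
--     return pair_count
-- ===== SOURCE B (Python) =====
-- def _sum_min(n, w):
--     # closed form of sum(min(i, w) for i in range(n)), n > 0
--     if w <= 0: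
--         return n * w
--     if w >= n - 1:
--         return n * (n - 1) // 2
--     return w * (w + 1) // 2 + (n - 1 - w) * w
--
--
-- def get_skipgrams_size(path_len: int, left_win_size: int, right_win_size: int) -> int:
--     """Compute skipgrams size."""
--     assert path_len > 0
--     return _sum_min(path_len, left_win_size) + _sum_min(path_len, right_win_size)
-- ===== Notes on version B (the rewrite author's own statement) =====
-- stated objective: faster
-- what changed: Replaces the O(path_len) loop with an O(1) closed form: per-index contribution min(i,L)+min(path_len-1-i,R) is summed by triangular-number formulas for each window side.
import Mathlib
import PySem

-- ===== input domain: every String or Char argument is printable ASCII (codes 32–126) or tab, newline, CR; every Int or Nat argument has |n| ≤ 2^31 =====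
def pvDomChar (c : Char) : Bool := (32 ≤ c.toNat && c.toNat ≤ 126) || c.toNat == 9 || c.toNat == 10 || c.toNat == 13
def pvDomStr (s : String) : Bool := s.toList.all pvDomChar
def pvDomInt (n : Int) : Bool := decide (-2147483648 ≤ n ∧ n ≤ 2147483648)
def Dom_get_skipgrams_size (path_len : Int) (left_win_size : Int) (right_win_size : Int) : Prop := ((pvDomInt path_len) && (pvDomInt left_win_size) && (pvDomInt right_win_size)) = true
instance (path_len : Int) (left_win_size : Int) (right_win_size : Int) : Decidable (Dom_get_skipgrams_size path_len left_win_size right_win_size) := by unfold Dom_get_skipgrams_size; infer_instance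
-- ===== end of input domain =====

-- B replaces A's O(path_len) loop by an O(1) closed form (triangular-number sums per window side).

-- ===== PORT A =====
-- literal port of A's loop: pair_count += (i - max(0, i - L)) + (min(path_len-1, i + R) - i)
def get_skipgrams_size (path_len : Int) (left_win_size : Int) (right_win_size : Int) : Int :=
  (PySem.List.pyRange 0 path_len 1).foldl
    (fun pair_count i =>
      pair_count + ((i - max 0 (i - left_win_size)) +
        (min (path_len - 1) (i + right_win_size) - i)))
    0

-- ===== PORT B =====
-- port of Source B's _sum_min: closed form of sum(min(i, w) for i in range(n))
def pvSumMin (n : Int) (w : Int) : Int :=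
  if w ≤ 0 then n * w
  else if n - 1 ≤ w then PySem.Int.floordiv (n * (n - 1)) 2
  else PySem.Int.floordiv (w * (w + 1)) 2 + (n - 1 - w) * w

def get_skipgrams_size_alt (path_len : Int) (left_win_size : Int) (right_win_size : Int) : Int :=
  pvSumMin path_len left_win_size + pvSumMin path_len right_win_size

-- ===== PRECONDITION & SPEC =====
-- Pre_: both programs assert path_len > 0 (AssertionError otherwise)
def Pre_get_skipgrams_size (path_len : Int) (left_win_size : Int) (right_win_size : Int) : Prop := 0 < path_len
instance (path_len : Int) (left_win_size : Int) (right_win_size : Int) : Decidable (Pre_get_skipgrams_size path_len left_win_size right_win_size) := by unfold Pre_get_skipgrams_size; infer_instance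
def pvWitness_get_skipgrams_size : Int × Int × Int := (5, 2, 3)

def Spec_get_skipgrams_size (path_len : Int) (left_win_size : Int) (right_win_size : Int) (out : Int) : Prop := out = get_skipgrams_size_alt path_len left_win_size right_win_size
instance (path_len : Int) (left_win_size : Int) (right_win_size : Int) (out : Int) : Decidable (Spec_get_skipgrams_size path_len left_win_size right_win_size out) := by unfold Spec_get_skipgrams_size; infer_instance

-- ===== CLAIM (what is proved, stated in full; the proofs are below) =====
def Claim_equal_get_skipgrams_size : Prop := ∀ (path_len : Int) (left_win_size : Int) (right_win_size : Int), Dom_get_skipgrams_size path_len left_win_size right_win_size → Pre_get_skipgrams_size path_len left_win_size right_win_size → Spec_get_skipgrams_size path_len left_win_size right_win_size (get_skipgrams_size path_len left_win_size right_win_size)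

-- ===== LEMMAS AND PROOFS =====

-- sum of min(i, w) over i = 0 .. m-1
def pvSL (w : Int) : Nat → Int
  | 0 => 0
  | m + 1 => pvSL w m + min (m : Int) w

-- sum of min(n - 1 - i, R) over i = 0 .. m-1
def pvSR (n R : Int) : Nat → Int
  | 0 => 0
  | m + 1 => pvSR n R m + min (n - 1 - (m : Int)) R

-- triangular numbers: T m = 0 + 1 + … + (m-1)
def pvT : Nat → Int
  | 0 => 0
  | m + 1 => pvT m + m

lemma pvT_two_mul (m : Nat) : 2 * pvT m = (m : Int) * ((m : Int) - 1) := by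
  induction m with
  | zero => simp [pvT]
  | succ k ih =>
    simp only [pvT]
    push_cast
    push_cast at ih
    ring_nf
    ring_nf at ih
    linarith

lemma pvFloordiv_T (m : Nat) :
    PySem.Int.floordiv ((m : Int) * ((m : Int) + 1)) 2 = pvT (m + 1) := by
  have h : (m : Int) * ((m : Int) + 1) = 2 * pvT (m + 1) := by
    have := pvT_two_mul (m + 1); push_cast at this ⊢; linarith
  rw [h, PySem.Int.floordiv_eq_ediv_of_pos (by norm_num)]
  exact Int.mul_ediv_cancel_left _ (by norm_num)

lemma pvSL_closed (w : Int) (m : Nat) :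
    pvSL w m = if w ≤ 0 then (m : Int) * w
      else if (m : Int) - 1 ≤ w then pvT m
      else pvT (w.toNat + 1) + ((m : Int) - 1 - w) * w := by
  induction m with
  | zero =>
    simp only [pvSL]
    split_ifs with h h2
    · simp
    · simp [pvT]
    · exfalso; omega
  | succ k ih =>
    simp only [pvSL, ih]
    push_cast
    split_ifs with hw h1 h2 h2
    · have h : min (k : Int) w = w := by omega
      rw [h]; ring
    · have h : min (k : Int) w = (k : Int) := by omega
      rw [h]; simp [pvT]
    · have h : min (k : Int) w = w := by omega
      have hkw : w = (k : Int) - 1 := by omega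
      have hnat : w.toNat + 1 = k := by omega
      have hco : ((k : Int) + 1 - 1 - w) * w = w := by
        have h1w : (k : Int) + 1 - 1 - w = 1 := by omega
        rw [h1w]; ring
      rw [h, hnat, hco]
    · exfalso; omega
    · have h : min (k : Int) w = w := by omega
      rw [h]; ring

-- bridge: pvSumMin on a positive n equals pvSL
lemma pvSumMin_eq_pvSL (n w : Int) (hn : 0 < n) : pvSumMin n w = pvSL w n.toNat := by
  rw [pvSL_closed]
  have hcast : ((n.toNat : Int)) = n := Int.toNat_of_nonneg (by omega)
  unfold pvSumMin
  by_cases hw : w ≤ 0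
  · simp only [if_pos hw, hcast]
  · simp only [if_neg hw]
    by_cases h1 : n - 1 ≤ w
    · have h1' : ((n.toNat : Int)) - 1 ≤ w := by rw [hcast]; exact h1
      simp only [if_pos h1, if_pos h1']
      have hm : n.toNat = (n.toNat - 1) + 1 := by omega
      have := pvFloordiv_T (n.toNat - 1)
      have harg : n * (n - 1) = ((n.toNat - 1 : Nat) : Int) * (((n.toNat - 1 : Nat) : Int) + 1) := by
        push_cast [Nat.cast_sub (by omega : 1 ≤ n.toNat)]
        rw [hcast]; ring
      rw [harg, this, ← hm]
    · have h1' : ¬ (((n.toNat : Int)) - 1 ≤ w) := by rw [hcast]; exact h1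
      simp only [if_neg h1, hcast]
      have hwc : ((w.toNat : Int)) = w := Int.toNat_of_nonneg (by omega)
      have hfd : PySem.Int.floordiv (w * (w + 1)) 2 = pvT (w.toNat + 1) := by
        rw [← hwc]; exact pvFloordiv_T w.toNat
      rw [hfd]

-- reversing the right-hand sum: pvSR over the whole range is pvSL with R
lemma pvSR_partial (n R : Int) (hn : 0 < n) :
    ∀ m : Nat, m ≤ n.toNat → pvSR n R m = pvSL R n.toNat - pvSL R (n.toNat - m) := by
  intro m
  induction m with
  | zero => simp [pvSR]
  | succ k ih =>
    intro hk
    have hk' : k ≤ n.toNat := by omega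
    have hsplit : n.toNat - k = (n.toNat - (k + 1)) + 1 := by omega
    have hx : pvSL R (n.toNat - k) = pvSL R (n.toNat - (k + 1)) + min ((n.toNat - (k + 1) : Nat) : Int) R := by
      rw [hsplit]; simp [pvSL]
    have hterm : ((n.toNat - (k + 1) : Nat) : Int) = n - 1 - (k : Int) := by
      push_cast [Nat.cast_sub hk]
      omega
    simp only [pvSR, ih hk', hx, hterm]
    ring

-- the loop computes pvSL + pvSR
lemma pvFold_eq (n L R : Int) (m : Nat) (c : Int) :
    (PySem.List.pyRange 0 (m : Int) 1).foldl
      (fun pair_count i =>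
        pair_count + ((i - max 0 (i - L)) + (min (n - 1) (i + R) - i))) c
      = c + pvSL L m + pvSR n R m := by
  induction m generalizing c with
  | zero => simp [PySem.List.pyRange_one_eq_nil, pvSL, pvSR]
  | succ k ih =>
    have hm : ((k + 1 : Nat) : Int) = (k : Int) + 1 := by push_cast; ring
    rw [hm, PySem.List.pyRange_one_succ_right (by positivity), List.foldl_append, ih]
    simp only [List.foldl_cons, List.foldl_nil, pvSL, pvSR]
    have h1 : (k : Int) - max 0 ((k : Int) - L) = min (k : Int) L := by omega
    have h2 : min (n - 1) ((k : Int) + R) - (k : Int) = min (n - 1 - (k : Int)) R := by omega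
    rw [h1, h2]
    ring

-- ===== VERDICT (by name: the statement is the Claim_ definition above) =====
theorem get_skipgrams_size_spec : Claim_equal_get_skipgrams_size := by
  intro n L R _hDom hPre
  have hn : 0 < n := hPre
  unfold Spec_get_skipgrams_size get_skipgrams_size get_skipgrams_size_alt
  have hcast : ((n.toNat : Int)) = n := Int.toNat_of_nonneg (by omega)
  have key := pvFold_eq n L R n.toNat 0
  rw [hcast] at key
  rw [key, pvSR_partial n R hn n.toNat le_rfl,
      pvSumMin_eq_pvSL n L hn, pvSumMin_eq_pvSL n R hn]
  simp [pvSL]
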